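-- pv_equiv track=rewrite | github.com/kreeuwijk/omniverse-dsx-blueprint-for-ai-factories | deps/kit-usd-agents/source/modules/lc_agent/src/lc_agent/code_atlas/module_analyzer.py | _replace_colons_outside_brackets
-- ===== SOURCE A (Python) =====
-- def _replace_colons_outside_brackets(source):
--     processed_lines = []
--     for line in source.splitlines():
--         result = []
--         inside_brackets = False  # Track whether we're inside square brackets
--         chars = iter(enumerate(line))  # Create an iterator to go through line with index
--
--         for index, char in chars:
--             if char == "[":
--                 inside_brackets = True
--             elif char == "]":
--                 inside_brackets = False
--
--             # Check for '::' outside of square brackets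
--             if not inside_brackets and char == ":" and (index + 1) < len(line) and line[index + 1] == ":":
--                 result.append(".")
--                 next(chars, None)  # Skip the next character as it's part of '::'
--             else:
--                 result.append(char)
--
--         processed_lines.append("".join(result))
--
--     return "\n".join(processed_lines)
-- ===== SOURCE B (Python) =====
-- def _replace_colons_outside_brackets(source):
--     def process(line):
--         parts = []
--         rest = line
--         while rest:
--             j = rest.find("[")
--             if j == -1:
--                 parts.append(rest.replace("::", "."))
--                 rest = ""
--             else:
--                 parts.append(rest[:j].replace("::", "."))
--                 k = rest.find("]", j + 1)
--                 if k == -1: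
--                     k = len(rest)
--                 parts.append(rest[j:k])
--                 rest = rest[k:]
--         return "".join(parts)
--
--     return "\n".join(process(line) for line in source.splitlines())
-- ===== Notes on version B (the rewrite author's own statement) =====
-- stated objective: faster
-- what changed: A's manual char-by-char scan with a double-colon lookahead and an iterator next()-skip is replaced by splitting each line into outside/inside-bracket segments via str.find slicing and applying str.replace on the outside segments only.
import Mathlib
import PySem

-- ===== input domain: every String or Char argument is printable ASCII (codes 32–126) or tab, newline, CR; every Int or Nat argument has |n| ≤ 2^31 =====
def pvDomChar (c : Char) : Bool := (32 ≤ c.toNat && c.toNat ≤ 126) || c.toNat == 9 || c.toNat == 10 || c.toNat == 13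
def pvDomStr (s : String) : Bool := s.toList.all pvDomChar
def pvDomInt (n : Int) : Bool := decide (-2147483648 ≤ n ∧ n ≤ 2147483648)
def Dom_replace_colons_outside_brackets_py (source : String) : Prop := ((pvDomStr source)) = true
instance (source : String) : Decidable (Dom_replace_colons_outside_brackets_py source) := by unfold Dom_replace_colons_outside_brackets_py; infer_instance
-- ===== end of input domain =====

-- B replaces A's char-by-char scan (manual double-colon lookahead + iterator skip) by splitting
-- each line into outside/inside-bracket segments (str.find slicing) and running str.replace on
-- the outside segments only; same O(n), measurably faster in CPython (C-level find/replace).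

-- ===== PORT A =====
-- per-line scan of A: flag update first, then the '::'-outside check with lookahead
-- (line[index+1] = head of the chars remaining in the iterator) and the next()-skip (= drop it).
def pvALine : Bool → List Char → List Char
  | _, [] => []
  | inside, c :: rest =>
    let inside' := if c = '[' then true else if c = ']' then false else inside
    if inside' = false ∧ c = ':' ∧ rest.head? = some ':' then
      '.' :: pvALine inside' rest.tail
    else
      c :: pvALine inside' rest
termination_by _ l => l.length
decreasing_by
  all_goals (simp [List.length_tail]; try omega)

def replace_colons_outside_brackets_py (source : String) : String :=
  PySem.Str.join "\n"
    ((PySem.Str.splitlines source).map (fun line => String.ofList (pvALine false line.toList)))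

-- ===== PORT B =====
-- per-line loop of B: rest.find('[') / rest.find(']', j+1) together with the slices rest[:j],
-- rest[j:k], rest[k:] are ported as the corresponding takeWhile/dropWhile spans
-- (the 'k == -1 → k = len(rest)' normalisation is exactly the span semantics).
def pvBLine (cs : List Char) : List Char :=
  PySem.Chars.replace (cs.takeWhile (· ≠ '[')) [':', ':'] ['.'] ++
    (match h : cs.dropWhile (· ≠ '[') with
     | [] => []
     | br :: r =>
       (br :: r.takeWhile (· ≠ ']')) ++ pvBLine (r.dropWhile (· ≠ ']')))
termination_by cs.length
decreasing_by
  have h1 : (List.dropWhile (· ≠ '[') cs).length ≤ cs.length := List.length_dropWhile_le _ _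
  rw [h] at h1
  have h2 : (List.dropWhile (· ≠ ']') r).length ≤ r.length := List.length_dropWhile_le _ _
  simp at h1
  omega

def replace_colons_outside_brackets_py_alt (source : String) : String :=
  PySem.Str.join "\n"
    ((PySem.Str.splitlines source).map (fun line => String.ofList (pvBLine line.toList)))

-- ===== PRECONDITION & SPEC =====
def Spec_replace_colons_outside_brackets_py (source : String) (out : String) : Prop := out = replace_colons_outside_brackets_py_alt source
instance (source : String) (out : String) : Decidable (Spec_replace_colons_outside_brackets_py source out) := by unfold Spec_replace_colons_outside_brackets_py; infer_instance

-- ===== CLAIM (what is proved, stated in full; the proofs are below) =====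
def Claim_equal_replace_colons_outside_brackets_py : Prop := ∀ (source : String), Dom_replace_colons_outside_brackets_py source → Spec_replace_colons_outside_brackets_py source (replace_colons_outside_brackets_py source)

-- ===== LEMMAS AND PROOFS =====

-- proof-side characterisation of Python's s.replace("::", ".") — leftmost, non-overlapping
def pvRepl : List Char → List Char
  | [] => []
  | c :: t =>
    if c = ':' ∧ t.head? = some ':' then '.' :: pvRepl t.tail else c :: pvRepl t
termination_by l => l.length
decreasing_by
  all_goals (simp [List.length_tail]; try omega)

theorem pvReplaceGo_eq (fuel : Nat) : ∀ (l acc : List Char), l.length ≤ fuel →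
    PySem.Chars.replace.go [':', ':'] ['.'] fuel l acc = acc.reverse ++ pvRepl l := by
  induction fuel with
  | zero =>
    intro l acc h
    have : l = [] := List.eq_nil_of_length_eq_zero (Nat.le_zero.mp h)
    subst this
    simp [PySem.Chars.replace.go, pvRepl]
  | succ n ih =>
    intro l acc h
    match l with
    | [] => simp [PySem.Chars.replace.go, pvRepl]
    | [c] =>
      rw [PySem.Chars.replace.go]
      have hp : List.isPrefixOf [':', ':'] [c] = false := by
        simp [List.isPrefixOf]
      rw [hp]
      simp only [Bool.false_eq_true, if_false]
      rw [ih [] (c :: acc) (by simp)]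
      simp [pvRepl]
    | c :: d :: t =>
      rw [PySem.Chars.replace.go]
      by_cases hc : c = ':' ∧ d = ':'
      · obtain ⟨rfl, rfl⟩ := hc
        have hp : List.isPrefixOf [':', ':'] (':' :: ':' :: t) = true := by
          simp [List.isPrefixOf]
        rw [hp]
        simp only [if_true]
        have ht : t.length ≤ n := by simp at h; omega
        rw [show List.drop [':',':'].length (':' :: ':' :: t) = t from rfl]
        rw [ih t (['.'].reverse ++ acc) ht]
        rw [pvRepl]
        simp
      · have hp : List.isPrefixOf [':', ':'] (c :: d :: t) = false := by
          simp [List.isPrefixOf]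
          intro h1 h2
          exact hc ⟨h1.symm, h2.symm⟩
        rw [hp]
        simp only [Bool.false_eq_true, if_false]
        have ht : (d :: t).length ≤ n := by simp at h ⊢; omega
        rw [ih (d :: t) (c :: acc) ht]
        have hnc : ¬ (c = ':' ∧ (d :: t).head? = some ':') := by
          simpa using hc
        conv_rhs => rw [pvRepl]
        rw [if_neg hnc]
        simp

theorem pvReplace_eq (l : List Char) :
    PySem.Chars.replace l [':', ':'] ['.'] = pvRepl l := by
  rw [PySem.Chars.replace]
  simp only [List.isEmpty_cons, if_false, Bool.false_eq_true]
  exact pvReplaceGo_eq l.length l [] le_rfl |>.trans (by simp)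

-- A's scan over a bracket-free prefix, outside brackets, is exactly the '::' → '.' replacement
theorem pvOutside (n : Nat) : ∀ (out rest : List Char), out.length ≤ n →
    (∀ c ∈ out, c ≠ '[') → (rest = [] ∨ rest.head? = some '[') →
    pvALine false (out ++ rest) = pvRepl out ++ pvALine false rest := by
  induction n with
  | zero =>
    intro out rest h _ _
    have : out = [] := List.eq_nil_of_length_eq_zero (Nat.le_zero.mp h)
    subst this; simp [pvRepl]
  | succ n ih =>
    intro out rest h hout hrest
    match out with
    | [] => simp [pvRepl]
    | c :: t =>
      have hcne : c ≠ '[' := hout c (by simp)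
      rw [List.cons_append, pvALine]
      have hin : (if c = '[' then true else if c = ']' then false else false) = false := by
        rw [if_neg hcne]; split <;> rfl
      simp only [hin]
      by_cases hc : c = ':' ∧ (t ++ rest).head? = some ':'
      · obtain ⟨rfl, hh⟩ := hc
        -- t must be nonempty with head ':': rest is empty or starts with '['
        match t with
        | [] =>
          exfalso
          simp only [List.nil_append] at hh
          rcases hrest with rfl | hr
          · simp at hh
          · rw [hh] at hr; simp at hr
        | d :: t' =>
          simp only [List.cons_append, List.head?_cons, Option.some.injEq] at hh
          subst hh
          rw [if_pos (by simp)]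
          simp only [List.cons_append, List.tail_cons]
          have ht' : t'.length ≤ n := by simp at h; omega
          rw [ih t' rest ht' (fun c hc => hout c (by simp [hc])) hrest]
          rw [pvRepl]
          rw [if_pos (by simp)]
          simp
      · rw [if_neg (by simpa using hc)]
        have hc' : ¬ (c = ':' ∧ t.head? = some ':') := by
          intro ⟨h1, h2⟩
          exact hc ⟨h1, by rcases t with _ | ⟨d, t'⟩ <;> simp_all⟩
        have ht : t.length ≤ n := by simp at h; omega
        rw [ih t rest ht (fun x hx => hout x (by simp [hx])) hrest]
        rw [pvRepl]
        rw [if_neg hc']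
        simp

-- A's scan inside brackets copies every character up to (excluding) the closing ']'
theorem pvInside : ∀ (ins rest : List Char), (∀ c ∈ ins, c ≠ ']') →
    pvALine true (ins ++ rest) = ins ++ pvALine true rest := by
  intro ins
  induction ins with
  | nil => simp
  | cons c t iht =>
    intro rest hins
    have hcne : c ≠ ']' := hins c (by simp)
    rw [List.cons_append, pvALine]
    have hin : (if c = '[' then true else if c = ']' then false else true) = true := by
      by_cases h1 : c = '[' <;> simp [h1, hcne]
    simp only [hin]
    rw [if_neg (by simp)]
    rw [iht rest (fun x hx => hins x (by simp [hx]))]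
    simp

-- at a ']' (or the end of the line) the flag value does not matter
theorem pvBridge : ∀ (r : List Char), (r = [] ∨ r.head? = some ']') →
    pvALine true r = pvALine false r := by
  intro r hr
  rcases hr with rfl | hr
  · simp [pvALine]
  · match r with
    | [] => simp [pvALine]
    | c :: t =>
      simp at hr
      subst hr
      rw [pvALine, pvALine]
      simp

-- the head of a nonempty dropWhile falsifies the predicate
theorem pvDropHead {p : Char → Bool} : ∀ (l : List Char) {b : Char} {t : List Char},
    l.dropWhile p = b :: t → p b = false := by
  intro l
  induction l with
  | nil => intro b t h; simp at h
  | cons c cs ih =>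
    intro b t h
    by_cases hp : p c
    · rw [List.dropWhile_cons_of_pos hp] at h; exact ih h
    · rw [List.dropWhile_cons_of_neg hp] at h
      cases h
      simpa using hp

theorem pvALine_open (r : List Char) : pvALine false ('[' :: r) = '[' :: pvALine true r := by
  rw [pvALine]
  simp

theorem pvMain (n : Nat) : ∀ (cs : List Char), cs.length ≤ n →
    pvALine false cs = pvBLine cs := by
  induction n with
  | zero =>
    intro cs h
    have : cs = [] := List.eq_nil_of_length_eq_zero (Nat.le_zero.mp h)
    subst this
    rw [pvBLine, pvReplace_eq]
    simp [pvALine, pvRepl]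
  | succ n ih =>
    intro cs h
    have hsplit : cs.takeWhile (· ≠ '[') ++ cs.dropWhile (· ≠ '[') = cs :=
      List.takeWhile_append_dropWhile
    have hout : ∀ c ∈ cs.takeWhile (· ≠ '['), c ≠ '[' := by
      intro c hc
      simpa using List.mem_takeWhile_imp hc
    rw [pvBLine]
    split
    case _ hr =>
      rw [pvReplace_eq]
      rw [hr] at hsplit
      conv_lhs => rw [← hsplit]
      rw [pvOutside (cs.takeWhile (· ≠ '[')).length _ [] le_rfl hout (Or.inl rfl)]
      simp [pvALine]
    case _ br r hr =>
      rw [pvReplace_eq]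
      have hbr : br = '[' := by
        have := pvDropHead cs hr
        simpa using this
      subst hbr
      have hins : ∀ c ∈ r.takeWhile (· ≠ ']'), c ≠ ']' := by
        intro c hc
        simpa using List.mem_takeWhile_imp hc
      have hr2 : r.dropWhile (· ≠ ']') = [] ∨ (r.dropWhile (· ≠ ']')).head? = some ']' := by
        cases hd : r.dropWhile (· ≠ ']') with
        | nil => exact Or.inl rfl
        | cons b t =>
          right
          have := pvDropHead r hd
          simp at this
          simp [this]
      have hlen : (r.dropWhile (· ≠ ']')).length ≤ n := by
        have h1 : ('[' :: r).length ≤ cs.length := by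
          rw [← hr]; exact List.length_dropWhile_le _ _
        have h2 : (r.dropWhile (· ≠ ']')).length ≤ r.length := List.length_dropWhile_le _ _
        simp at h1
        omega
      rw [hr] at hsplit
      conv_lhs => rw [← hsplit]
      rw [pvOutside (cs.takeWhile (· ≠ '[')).length _ _ le_rfl hout (Or.inr rfl)]
      rw [pvALine_open]
      conv_lhs => rw [← List.takeWhile_append_dropWhile (p := (· ≠ ']')) (l := r)]
      rw [pvInside _ _ hins]
      rw [pvBridge _ hr2]
      rw [ih _ hlen]
      simp

-- ===== VERDICT (by name: the statement is the Claim_ definition above) =====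
theorem replace_colons_outside_brackets_py_spec : Claim_equal_replace_colons_outside_brackets_py := by
  intro source _
  unfold Spec_replace_colons_outside_brackets_py
  unfold replace_colons_outside_brackets_py replace_colons_outside_brackets_py_alt
  congr 1
  apply List.map_congr_left
  intro line _
  rw [pvMain line.toList.length line.toList le_rfl]
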